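-- pv_equiv track=rewrite | github.com/madfalc0n/my_coding_labs | algorithm/programmers/regular_test/10/q4.py | solution
-- ===== SOURCE A (Python) =====
-- def solution(s):
--     len_s = len(s)
--     result = 0
--     for i in range(len_s):
--         tmp_cnt = 0
--         for j in range(i+1,len_s):
--             tmp_cnt = j - i
--             if s[i] == s[j]:
--                 if tmp_cnt != 0:
--                     tmp_cnt -= 1
--             result += tmp_cnt
--
--     return result
-- ===== SOURCE B (Python) =====
-- def solution(s):
--     # closed-form pair-distance sum minus per-character C(c,2) equal-pair count
--     n = len(s)
--     total = n * (n * n - 1) // 6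
--     counts = {}
--     for ch in s:
--         counts[ch] = counts.get(ch, 0) + 1
--     for c in counts.values():
--         total -= c * (c - 1) // 2
--     return total
-- ===== Notes on version B (the rewrite author's own statement) =====
-- stated objective: faster
-- what changed: Replaces the O(n^2) double loop over index pairs by a closed-form n(n^2-1)/6 distance sum and a single counting pass that subtracts C(count,2) per distinct character.
import Mathlib
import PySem

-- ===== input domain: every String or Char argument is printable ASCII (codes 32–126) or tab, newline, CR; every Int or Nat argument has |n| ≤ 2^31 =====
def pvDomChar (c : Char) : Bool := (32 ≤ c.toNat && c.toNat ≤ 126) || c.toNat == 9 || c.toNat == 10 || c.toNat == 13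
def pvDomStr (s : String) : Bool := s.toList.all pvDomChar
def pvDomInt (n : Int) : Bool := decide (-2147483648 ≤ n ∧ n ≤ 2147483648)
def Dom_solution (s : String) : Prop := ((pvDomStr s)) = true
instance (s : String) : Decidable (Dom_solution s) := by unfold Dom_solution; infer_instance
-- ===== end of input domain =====

-- B replaces A's double loop over index pairs by a closed-form distance sum and one counting pass (objective: faster).

-- ===== PORT A =====
def solution (s : String) : Int :=
  let cs := s.toList
  let len_s : Int := PySem.List.len cs
  (PySem.List.pyRange 0 len_s).foldl (fun result i =>
    ((PySem.List.pyRange (i + 1) len_s).foldl (fun (st : Int × Int) j =>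
        let tmp_cnt : Int := j - i
        let tmp_cnt : Int :=
          if PySem.List.pyGet? cs i == PySem.List.pyGet? cs j then
            (if tmp_cnt ≠ 0 then tmp_cnt - 1 else tmp_cnt)
          else tmp_cnt
        (st.1 + tmp_cnt, tmp_cnt)) (result, 0)).1) 0

-- ===== PORT B =====
def solution_alt (s : String) : Int :=
  let cs := s.toList
  let n : Int := PySem.List.len cs
  let total : Int := PySem.Int.floordiv (n * (n * n - 1)) 6
  let counts : PySem.Dict Char Int :=
    cs.foldl (fun d ch => d.insert ch (d.getD ch 0 + 1)) PySem.Dict.empty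
  counts.values.foldl (fun total c => total - PySem.Int.floordiv (c * (c - 1)) 2) total

-- ===== PRECONDITION & SPEC =====
def Spec_solution (s : String) (out : Int) : Prop := out = solution_alt s
instance (s : String) (out : Int) : Decidable (Spec_solution s out) := by unfold Spec_solution; infer_instance

-- ===== CLAIM (what is proved, stated in full; the proofs are below) =====
def Claim_equal_solution : Prop := ∀ (s : String), Dom_solution s → Spec_solution s (solution s)

-- ===== LEMMAS AND PROOFS =====

-- number of pairs (i, j), i < j, cs[i] = cs[j], counted structurally
def Epairs : List Char → Int
  | [] => 0
  | x :: t => t.count x + Epairs t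

theorem pyRange_eq_nil {a b : Int} (h : b ≤ a) : PySem.List.pyRange a b = [] :=
  List.eq_nil_iff_forall_not_mem.2 (fun x hx => by have := (PySem.List.mem_pyRange_one).1 hx; omega)

theorem pyRange_shift (a b : Int) :
    PySem.List.pyRange (a + 1) (b + 1) = (PySem.List.pyRange a b).map (· + 1) := by
  simp only [PySem.List.pyRange, if_neg (one_ne_zero), if_pos zero_lt_one, List.map_map]
  have h1 : (b + 1 - (a + 1) + 1 - 1) / 1 = (b - a + 1 - 1) / 1 := by ring_nf
  split_ifs with h2 h3 h3
  · rw [h1]; apply List.map_congr_left; intro k _; simp; ring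
  · omega
  · omega
  · rfl

theorem pyGet?_cons_succ (x : Char) (t : List Char) (k : Int) (h : 0 ≤ k) :
    PySem.List.pyGet? (x :: t) (k + 1) = PySem.List.pyGet? t k := by
  simp only [PySem.List.pyGet?, PySem.List.pyIdx?, List.length_cons]
  rw [if_pos (by omega), if_pos h]
  by_cases hk : k < (t.length : Int)
  · rw [if_pos (by push_cast; omega), if_pos hk]
    simp only [Option.bind_some]
    have : (k + 1).toNat = k.toNat + 1 := by omega
    rw [this]; simp
  · rw [if_neg (by push_cast; omega), if_neg hk]; simp

theorem pyGet?_zero (x : Char) (t : List Char) :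
    PySem.List.pyGet? (x :: t) 0 = some x := by
  simp [PySem.List.pyGet?, PySem.List.pyIdx?]

theorem pyGet?_eq_some_pyGetD (t : List Char) (j : Int) (d : Char)
    (h0 : 0 ≤ j) (h1 : j < (t.length : Int)) :
    PySem.List.pyGet? t j = some (PySem.List.pyGetD t j d) := by
  simp only [PySem.List.pyGet?, PySem.List.pyGetD, PySem.List.pyIdx?, if_pos h0, if_pos h1]
  simp only [Option.bind_some]
  rw [List.getElem?_eq_getElem (by omega)]
  rfl

theorem sum_map_neg {α : Type} (l : List α) (f : α → Int) :
    (l.map (fun x => -f x)).sum = -(l.map f).sum := by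
  induction l with
  | nil => simp
  | cons x t ih => simp [ih]; ring

theorem sum_sub_const (a c : Int) (m : Nat) :
    2 * ((PySem.List.pyRange a (a + m)).map (fun j => j - c)).sum = m * (2*a - 2*c + m - 1) := by
  induction m with
  | zero => simp [pyRange_eq_nil (le_refl a)]
  | succ m ih =>
      have hcast : a + ((m : Int) + 1) = (a + m) + 1 := by ring
      rw [show ((m + 1 : Nat) : Int) = (m : Int) + 1 by push_cast; ring, hcast,
        PySem.List.pyRange_one_succ_right (by omega), List.map_append, List.sum_append]
      simp only [List.map_cons, List.map_nil, List.sum_cons, List.sum_nil]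
      nlinarith [ih]

theorem sum_const_sub (K : Int) (m : Nat) :
    2 * ((PySem.List.pyRange 0 (m : Int)).map (fun i => K - i)).sum = m * (2*K - m + 1) := by
  induction m with
  | zero => simp [pyRange_eq_nil (le_refl 0)]
  | succ m ih =>
      rw [show ((m + 1 : Nat) : Int) = (m : Int) + 1 by push_cast; ring,
        PySem.List.pyRange_one_succ_right (by positivity), List.map_append, List.sum_append]
      simp only [List.map_cons, List.map_nil, List.sum_cons, List.sum_nil]
      nlinarith [ih]

theorem sum_adj_prod (m : Nat) :
    3 * ((PySem.List.pyRange 0 (m : Int)).map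
        (fun i => ((m : Int) - 1 - i) * ((m : Int) - i))).sum = m * (m * m - 1) := by
  induction m with
  | zero => simp [pyRange_eq_nil (le_refl 0)]
  | succ m ih =>
      rw [show ((m + 1 : Nat) : Int) = (m : Int) + 1 by push_cast; ring,
        PySem.List.pyRange_one_succ_right (by positivity), List.map_append, List.sum_append]
      simp only [List.map_cons, List.map_nil, List.sum_cons, List.sum_nil]
      have hsplit : ((PySem.List.pyRange 0 (m : Int)).map
          (fun i => ((m : Int) + 1 - 1 - i) * ((m : Int) + 1 - i))).sum
          = ((PySem.List.pyRange 0 (m : Int)).map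
            (fun i => ((m : Int) - 1 - i) * ((m : Int) - i) + 2 * ((m : Int) - i))).sum := by
        apply congrArg; apply List.map_congr_left; intro i _; ring
      rw [hsplit, show (fun i => ((m : Int) - 1 - i) * ((m : Int) - i) + 2 * ((m : Int) - i))
          = (fun i => ((m : Int) - 1 - i) * ((m : Int) - i) + (fun i => 2 * ((m : Int) - i)) i) from rfl,
        PySem.List.sum_map_add_int]
      have h2 : ((PySem.List.pyRange 0 (m : Int)).map (fun i => 2 * ((m : Int) - i))).sum
          = 2 * ((PySem.List.pyRange 0 (m : Int)).map (fun i => (m : Int) - i)).sum := by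
        induction (PySem.List.pyRange 0 (m : Int)) with
        | nil => simp
        | cons x t iht => simp [iht]; ring
      have := sum_const_sub (m : Int) m
      nlinarith [ih]

-- the equal-character double sum of A equals Epairs
theorem eqpairs_sum (cs : List Char) :
    ((PySem.List.pyRange 0 (PySem.List.len cs)).map (fun i =>
      ((PySem.List.pyRange (i + 1) (PySem.List.len cs)).map (fun j =>
        if PySem.List.pyGet? cs i == PySem.List.pyGet? cs j then (1 : Int) else 0)).sum)).sum
    = Epairs cs := by
  induction cs with
  | nil => simp [PySem.List.len, pyRange_eq_nil (le_refl 0), Epairs]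
  | cons x t ih =>
      have hn : PySem.List.len (x :: t) = (t.length : Int) + 1 := by
        simp [PySem.List.len]
      set n : Int := (t.length : Int) with hndef
      have hsh : PySem.List.pyRange (0 + 1) (n + 1) = (PySem.List.pyRange 0 n).map (· + 1) :=
        pyRange_shift 0 n
      rw [hn, PySem.List.pyRange_one_cons (by omega), List.map_cons, List.sum_cons]
      have hhead : ((PySem.List.pyRange (0 + 1) (n + 1)).map (fun j =>
          if PySem.List.pyGet? (x :: t) 0 == PySem.List.pyGet? (x :: t) j then (1 : Int) else 0)).sum
          = (t.count x : Int) := by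
        rw [hsh, List.map_map]
        have hcg : ∀ j ∈ PySem.List.pyRange 0 n,
            ((fun j => if PySem.List.pyGet? (x :: t) 0 == PySem.List.pyGet? (x :: t) j then (1 : Int) else 0) ∘ (· + 1)) j
            = (fun c => if x == c then (1 : Int) else 0) (PySem.List.pyGetD t j ' ') := by
          intro j hj
          have hb := PySem.List.mem_pyRange_one.1 hj
          simp only [Function.comp]
          rw [pyGet?_zero, pyGet?_cons_succ x t j hb.1,
            pyGet?_eq_some_pyGetD t j ' ' hb.1 hb.2]
          simp
        rw [List.map_congr_left hcg]
        have hmm : List.map (fun j => (fun c => if x == c then (1 : Int) else 0) (PySem.List.pyGetD t j ' '))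
              (PySem.List.pyRange 0 n)
            = List.map (fun c => if x == c then (1 : Int) else 0)
              (List.map (fun j => PySem.List.pyGetD t j ' ') (PySem.List.pyRange 0 n)) := by
          rw [List.map_map]; exact List.map_congr_left fun _ _ => rfl
        rw [hmm,
          show PySem.List.pyRange 0 n = PySem.List.pyRange 0 (PySem.List.len t) from rfl,
          PySem.List.map_pyGetD_pyRange_zero t ' ',
          PySem.List.sum_map_ite_one_zero (fun c => x == c) t]
        congr 1
        rw [List.count_eq_countP]
        apply List.countP_congr
        intro c _
        rw [Bool.beq_comm (a := x) (b := c)]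
      have htail : ((PySem.List.pyRange (0 + 1) (n + 1)).map (fun i =>
          ((PySem.List.pyRange (i + 1) (n + 1)).map (fun j =>
            if PySem.List.pyGet? (x :: t) i == PySem.List.pyGet? (x :: t) j then (1 : Int) else 0)).sum)).sum
          = Epairs t := by
        rw [hsh, List.map_map, ← ih]
        apply congrArg
        apply List.map_congr_left
        intro i hi
        have hbi := PySem.List.mem_pyRange_one.1 hi
        simp only [Function.comp]
        rw [pyRange_shift (i + 1) n, List.map_map]
        apply congrArg
        apply List.map_congr_left
        intro j hj
        have hbj := PySem.List.mem_pyRange_one.1 hj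
        simp only [Function.comp]
        rw [pyGet?_cons_succ x t i hbi.1, pyGet?_cons_succ x t j (by omega)]
      rw [htail, hhead]
      simp [Epairs]

-- Epairs counted per distinct character
theorem eqpairs_choose (cs : List Char) :
    Epairs cs = ∑ v ∈ cs.toFinset, ((cs.count v).choose 2 : Int) := by
  induction cs with
  | nil => simp [Epairs]
  | cons x t ih =>
      simp only [Epairs, List.toFinset_cons, ih]
      by_cases hx : x ∈ t.toFinset
      · rw [Finset.insert_eq_self.2 hx]
        rw [← Finset.add_sum_erase _ _ hx, ← Finset.add_sum_erase _ _ hx]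
        have he : ∑ v ∈ t.toFinset.erase x, (((x :: t).count v).choose 2 : Int)
            = ∑ v ∈ t.toFinset.erase x, ((t.count v).choose 2 : Int) := by
          apply Finset.sum_congr rfl
          intro v hv
          have hne : v ≠ x := (Finset.mem_erase.1 hv).1
          simp [hne.symm]
        rw [he]
        have hc : (((x :: t).count x).choose 2 : Int) = (t.count x : Int) + ((t.count x).choose 2 : Int) := by
          rw [List.count_cons_self]
          rw [Nat.choose_succ_succ (t.count x) 1]
          push_cast [Nat.choose_one_right]
          ring
        rw [hc]; ring
      · rw [Finset.sum_insert hx]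
        have h0 : t.count x = 0 := by
          simp [List.count_eq_zero]
          intro h; exact hx (List.mem_toFinset.2 h)
        have he : ∑ v ∈ t.toFinset, (((x :: t).count v).choose 2 : Int)
            = ∑ v ∈ t.toFinset, ((t.count v).choose 2 : Int) := by
          apply Finset.sum_congr rfl
          intro v hv
          have hne : v ≠ x := by intro h; subst h; exact hx hv
          simp [hne.symm]
        rw [he, List.count_cons_self, h0]
        simp

theorem choose_two_floordiv (c : Nat) :
    PySem.Int.floordiv ((c : Int) * ((c : Int) - 1)) 2 = ((c.choose 2 : Nat) : Int) := by
  rw [PySem.Int.floordiv_eq_ediv_of_pos (by norm_num)]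
  cases c with
  | zero => simp
  | succ k =>
      rw [Nat.choose_two_right]
      have h1 : ((k + 1 : Nat) : Int) * (((k + 1 : Nat) : Int) - 1) = (((k + 1) * k : Nat) : Int) := by
        push_cast; ring
      rw [h1, Nat.succ_sub_one]
      rw [Int.natCast_ediv]
      push_cast
      ring

-- the pair-distance double sum in closed form
theorem dist_sum (m : Nat) :
    ((PySem.List.pyRange 0 (m : Int)).map (fun i =>
      ((PySem.List.pyRange (i + 1) (m : Int)).map (fun j => j - i)).sum)).sum * 6
    = (m : Int) * ((m : Int) * (m : Int) - 1) := by
  have hinner : ∀ i ∈ PySem.List.pyRange 0 (m : Int),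
      2 * ((PySem.List.pyRange (i + 1) (m : Int)).map (fun j => j - i)).sum
      = ((m : Int) - 1 - i) * ((m : Int) - i) := by
    intro i hi
    have hb := PySem.List.mem_pyRange_one.1 hi
    set k : Nat := ((m : Int) - 1 - i).toNat with hkdef
    have hk : (k : Int) = (m : Int) - 1 - i := by omega
    have h := sum_sub_const (i + 1) i k
    rw [show i + 1 + (k : Int) = (m : Int) by omega] at h
    rw [h]; nlinarith [hk]
  have h2 : 2 * ((PySem.List.pyRange 0 (m : Int)).map (fun i =>
      ((PySem.List.pyRange (i + 1) (m : Int)).map (fun j => j - i)).sum)).sum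
      = ((PySem.List.pyRange 0 (m : Int)).map
        (fun i => ((m : Int) - 1 - i) * ((m : Int) - i))).sum := by
    rw [← List.sum_map_mul_left]
    exact congrArg List.sum (List.map_congr_left hinner)
  have h3 := sum_adj_prod m
  nlinarith [h2, h3]

-- A's value: closed-form distance sum minus Epairs
theorem solution_eq (s : String) :
    solution s = PySem.Int.floordiv ((PySem.List.len s.toList) * ((PySem.List.len s.toList) * (PySem.List.len s.toList) - 1)) 6 - Epairs s.toList := by
  simp only [solution]
  set cs := s.toList with hcs
  set n : Int := PySem.List.len cs with hn
  have hstep : ∀ (res i : Int), i ∈ PySem.List.pyRange 0 n →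
      ((PySem.List.pyRange (i + 1) n).foldl (fun (st : Int × Int) j =>
        (st.1 + (if PySem.List.pyGet? cs i == PySem.List.pyGet? cs j then
            (if j - i ≠ 0 then j - i - 1 else j - i) else j - i),
         (if PySem.List.pyGet? cs i == PySem.List.pyGet? cs j then
            (if j - i ≠ 0 then j - i - 1 else j - i) else j - i))) (res, 0)).1
      = res + ((PySem.List.pyRange (i + 1) n).map (fun j =>
          (j - i) + -(if PySem.List.pyGet? cs i == PySem.List.pyGet? cs j then (1 : Int) else 0))).sum := by
    intro res i hi
    rw [PySem.List.foldl_prod_mk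
      (f := fun a j => a + (if PySem.List.pyGet? cs i == PySem.List.pyGet? cs j then
            (if j - i ≠ 0 then j - i - 1 else j - i) else j - i))
      (g := fun b j => (if PySem.List.pyGet? cs i == PySem.List.pyGet? cs j then
            (if j - i ≠ 0 then j - i - 1 else j - i) else j - i))]
    simp only
    rw [PySem.List.foldl_add]
    congr 1
    apply congrArg List.sum
    apply List.map_congr_left
    intro j hj
    have hbj := PySem.List.mem_pyRange_one.1 hj
    have hji : j - i ≠ 0 := by omega
    by_cases he : PySem.List.pyGet? cs i == PySem.List.pyGet? cs j
    · simp [he, hji]; ring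
    · simp [he]
  rw [PySem.List.foldl_congr_mem (PySem.List.pyRange 0 n) _
    (fun res i => res + ((PySem.List.pyRange (i + 1) n).map (fun j =>
        (j - i) + -(if PySem.List.pyGet? cs i == PySem.List.pyGet? cs j then (1 : Int) else 0))).sum)
    0 hstep]
  rw [PySem.List.foldl_add _ (fun i => ((PySem.List.pyRange (i + 1) n).map (fun j =>
      (j - i) + -(if PySem.List.pyGet? cs i == PySem.List.pyGet? cs j then (1 : Int) else 0))).sum), zero_add]
  have hsplit : ∀ i ∈ PySem.List.pyRange 0 n,
      ((PySem.List.pyRange (i + 1) n).map (fun j =>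
        (j - i) + -(if PySem.List.pyGet? cs i == PySem.List.pyGet? cs j then (1 : Int) else 0))).sum
      = (fun i => ((PySem.List.pyRange (i + 1) n).map (fun j => j - i)).sum
        + -(((PySem.List.pyRange (i + 1) n).map (fun j =>
            if PySem.List.pyGet? cs i == PySem.List.pyGet? cs j then (1 : Int) else 0)).sum)) i := by
    intro i _
    rw [PySem.List.sum_map_add_int, sum_map_neg]
  rw [List.map_congr_left hsplit, PySem.List.sum_map_add_int, sum_map_neg]
  have hdist : ((PySem.List.pyRange 0 n).map (fun i =>
      ((PySem.List.pyRange (i + 1) n).map (fun j => j - i)).sum)).sum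
      = PySem.Int.floordiv (n * (n * n - 1)) 6 := by
    have h6 := dist_sum cs.length
    rw [show ((cs.length : Nat) : Int) = n from rfl] at h6
    rw [← h6, PySem.Int.floordiv_eq_ediv_of_pos (by norm_num), Int.mul_ediv_cancel _ (by norm_num)]
  rw [hdist, eqpairs_sum]
  ring

-- B's value: the same closed form
theorem solution_alt_eq (s : String) :
    solution_alt s = PySem.Int.floordiv ((PySem.List.len s.toList) * ((PySem.List.len s.toList) * (PySem.List.len s.toList) - 1)) 6 - Epairs s.toList := by
  simp only [solution_alt]
  set cs := s.toList with hcs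
  set counts : PySem.Dict Char Int :=
    cs.foldl (fun d ch => d.insert ch (d.getD ch 0 + 1)) PySem.Dict.empty with hcounts
  have hkeys : counts.keys = PySem.Set.ofList cs := by
    rw [hcounts, PySem.Dict.keys_foldl_insert, PySem.Dict.keys_empty,
      PySem.Set.update, ← PySem.Set.ofList_eq_foldl]
  have hnod : counts.keys.Nodup := by
    rw [hcounts]
    exact PySem.Dict.nodup_keys_foldl_insert _ _ _ (by simp [PySem.Dict.keys_empty])
  have hvals : counts.values = (PySem.Set.ofList cs).map (fun k => (cs.count k : Int)) := by
    rw [PySem.Dict.values_eq_map_keys counts hnod 0, hkeys]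
    apply List.map_congr_left
    intro k _
    rw [hcounts, PySem.Dict.getD_foldl_insert_add_one, PySem.Dict.getD_empty, zero_add]
  rw [hvals]
  have hfc := PySem.List.foldl_congr_mem
    (l := (PySem.Set.ofList cs).map (fun k => ((cs.count k : Nat) : Int)))
    (init := PySem.Int.floordiv (PySem.List.len cs * (PySem.List.len cs * PySem.List.len cs - 1)) 6)
    (f := fun total c => total - PySem.Int.floordiv (c * (c - 1)) 2)
    (g := fun total c => total + -PySem.Int.floordiv (c * (c - 1)) 2)
    (fun acc x _ => sub_eq_add_neg acc _)
  rw [hfc]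
  rw [PySem.List.foldl_add _ (fun c => -PySem.Int.floordiv (c * (c - 1)) 2), List.map_map]
  have hpt : ∀ k ∈ PySem.Set.ofList cs,
      ((fun c => -PySem.Int.floordiv (c * (c - 1)) 2) ∘ (fun k => (cs.count k : Int))) k
      = (fun k => -((cs.count k).choose 2 : Int)) k := by
    intro k _
    simp only [Function.comp]
    rw [choose_two_floordiv]
  rw [List.map_congr_left hpt, sum_map_neg _ (fun k => ((cs.count k).choose 2 : Int)),
    ← List.sum_toFinset _ (PySem.Set.nodup_ofList cs)]
  have hfs : (PySem.Set.ofList cs).toFinset = cs.toFinset := by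
    apply Finset.ext; intro v
    simp [List.mem_toFinset, PySem.Set.mem_ofList]
  rw [hfs, ← eqpairs_choose]
  ring

-- ===== VERDICT (by name: the statement is the Claim_ definition above) =====
theorem solution_spec : Claim_equal_solution := by
  intro s _
  unfold Spec_solution
  rw [solution_eq, solution_alt_eq]
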